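-- pv_equiv track=rewrite | github.com/pun-intended/Springboard-Exercises | python-ds-practice/34_same_frequency/same_frequency.py | same_frequency
-- ===== SOURCE A (Python) =====
-- def same_frequency(num1, num2):
--     """Do these nums have same frequencies of digits?
--
--         >>> same_frequency(551122, 221515)
--         True
--
--         >>> same_frequency(321142, 3212215)
--         False
--
--         >>> same_frequency(1212, 2211)
--         True
--     """
--     num1_set = set(str(num1))
--     num2_set = set(str(num2))
--     if num1_set != num2_set:
--         return False
--     for num in num1_set:
--         if str(num1).count(num) != str(num2).count(num):
--             return False
--     return True
-- ===== SOURCE B (Python) =====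
-- def same_frequency(num1, num2):
--     """Do these nums have same frequencies of digits?"""
--     return sorted(str(num1)) == sorted(str(num2))
-- ===== Notes on version B (the rewrite author's own statement) =====
-- stated objective: simpler
-- what changed: Replaces A's set-equality test plus a per-unique-digit .count rescan of both strings by a single sort of each digit string and one list comparison.
import Mathlib
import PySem

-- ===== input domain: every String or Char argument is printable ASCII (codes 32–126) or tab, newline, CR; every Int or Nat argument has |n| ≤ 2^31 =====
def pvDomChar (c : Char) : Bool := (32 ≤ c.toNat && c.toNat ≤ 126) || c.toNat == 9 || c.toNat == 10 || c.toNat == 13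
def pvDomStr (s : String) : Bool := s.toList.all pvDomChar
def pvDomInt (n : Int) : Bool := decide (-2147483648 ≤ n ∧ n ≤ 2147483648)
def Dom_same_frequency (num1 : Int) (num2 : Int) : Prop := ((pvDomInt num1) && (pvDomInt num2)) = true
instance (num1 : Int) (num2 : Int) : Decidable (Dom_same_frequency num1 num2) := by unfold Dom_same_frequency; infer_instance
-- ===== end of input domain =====

-- B replaces A's set-equality test plus per-unique-digit count rescans by sorting
-- both digit strings once and comparing the sorted sequences (objective: simpler).

-- ===== PORT A =====
def same_frequency (num1 : Int) (num2 : Int) : Bool :=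
  let num1_set := PySem.Set.ofList (PySem.Int.toStr num1).toList
  let num2_set := PySem.Set.ofList (PySem.Int.toStr num2).toList
  if ¬ PySem.Set.equal num1_set num2_set then false
  else
    -- 'for num in num1_set: if counts differ: return False' / 'return True'
    num1_set.all (fun num =>
      (PySem.Int.toStr num1).toList.count num == (PySem.Int.toStr num2).toList.count num)

-- ===== PORT B =====
def same_frequency_alt (num1 : Int) (num2 : Int) : Bool :=
  PySem.List.sorted (PySem.Int.toStr num1).toList (fun x => x) ==
  PySem.List.sorted (PySem.Int.toStr num2).toList (fun x => x)

-- ===== PRECONDITION & SPEC =====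
def Spec_same_frequency (num1 : Int) (num2 : Int) (out : Bool) : Prop := out = same_frequency_alt num1 num2
instance (num1 : Int) (num2 : Int) (out : Bool) : Decidable (Spec_same_frequency num1 num2 out) := by unfold Spec_same_frequency; infer_instance

-- ===== CLAIM (what is proved, stated in full; the proofs are below) =====
def Claim_equal_same_frequency : Prop := ∀ (num1 : Int) (num2 : Int), Dom_same_frequency num1 num2 → Spec_same_frequency num1 num2 (same_frequency num1 num2)

-- ===== LEMMAS AND PROOFS =====

-- A's "sets equal and counts agree on every unique char of s1" is exactly s1 ~ s2.
lemma setEq_and_counts_iff_perm (s1 s2 : List Char) :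
    ((PySem.Set.equal (PySem.Set.ofList s1) (PySem.Set.ofList s2)) = true ∧
      ∀ c ∈ PySem.Set.ofList s1, s1.count c = s2.count c) ↔ s1.Perm s2 := by
  rw [PySem.Set.equal_iff]
  constructor
  · rintro ⟨hset, hcnt⟩
    rw [List.perm_iff_count]
    intro c
    by_cases hc : c ∈ s1
    · exact hcnt c ((PySem.Set.mem_ofList s1 c).mpr hc)
    · have hc2 : c ∉ s2 := by
        intro h
        exact hc ((PySem.Set.mem_ofList s1 c).mp
          ((hset c).mpr ((PySem.Set.mem_ofList s2 c).mpr h)))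
      simp [List.count_eq_zero_of_not_mem, hc, hc2]
  · intro hp
    refine ⟨fun c => ?_, fun c _ => hp.count_eq c⟩
    simp only [PySem.Set.mem_ofList]
    exact ⟨fun h => hp.mem_iff.mp h, fun h => hp.mem_iff.mpr h⟩

-- ===== VERDICT (by name: the statement is the Claim_ definition above) =====
theorem same_frequency_spec : Claim_equal_same_frequency := by
  intro num1 num2 _
  unfold Spec_same_frequency same_frequency same_frequency_alt
  set s1 := (PySem.Int.toStr num1).toList with hs1
  set s2 := (PySem.Int.toStr num2).toList with hs2
  rw [Bool.eq_iff_iff, beq_iff_eq, PySem.List.sorted_id_eq_sorted_id_iff_perm,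
    ← setEq_and_counts_iff_perm s1 s2]
  dsimp only
  constructor
  · intro h
    split_ifs at h with hset
    rw [List.all_eq_true] at h
    exact ⟨hset, fun c hc => by simpa using h c hc⟩
  · rintro ⟨hset, hcnt⟩
    rw [if_neg (by simpa using hset), List.all_eq_true]
    intro c hc
    simpa using hcnt c hc
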